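-- pv_equiv track=rewrite | github.com/RafDevX/advent-of-code | 2020/day9/part1.py | first_malformed_number
-- ===== SOURCE A (Python) =====
-- def valid_number(preamble, num):
-- 	for v in preamble:
-- 		if (num - v) in preamble:
-- 			return True
-- 	return False
--
-- def first_malformed_number(inp, preamble_size = 25):
-- 	preamble = inp[:preamble_size]
-- 	for i in range(preamble_size, len(inp)):
-- 		num = inp[i]
-- 		if not valid_number(preamble, num):
-- 			return num
-- 		preamble.pop(0)
-- 		preamble.append(num)
-- ===== SOURCE B (Python) =====
-- def first_malformed_number(inp, preamble_size=25):
-- 	for i in range(preamble_size, len(inp)):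
-- 		num = inp[i]
-- 		w = sorted(inp[i - preamble_size:i])
-- 		l, r = 0, len(w) - 1
-- 		found = False
-- 		while l <= r:
-- 			s = w[l] + w[r]
-- 			if s == num:
-- 				found = True
-- 				break
-- 			elif s < num:
-- 				l += 1
-- 			else:
-- 				r -= 1
-- 		if not found:
-- 			return num
-- 	return None
-- ===== Notes on version B (the rewrite author's own statement) =====
-- stated objective: alternative
-- what changed: Replaces A's per-element complement membership test over a mutable pop/append window by sorting the re-sliced window and running a classic two-pointer scan for a pair summing to num.
-- outside the precondition, e.g. on first_malformed_number([6, 4, -1, 3, 0, 3, 4], -1): A returns -1, B returns 6; on first_malformed_number([1, 2], -5): A raises IndexError, B raises IndexError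
import Mathlib
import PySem

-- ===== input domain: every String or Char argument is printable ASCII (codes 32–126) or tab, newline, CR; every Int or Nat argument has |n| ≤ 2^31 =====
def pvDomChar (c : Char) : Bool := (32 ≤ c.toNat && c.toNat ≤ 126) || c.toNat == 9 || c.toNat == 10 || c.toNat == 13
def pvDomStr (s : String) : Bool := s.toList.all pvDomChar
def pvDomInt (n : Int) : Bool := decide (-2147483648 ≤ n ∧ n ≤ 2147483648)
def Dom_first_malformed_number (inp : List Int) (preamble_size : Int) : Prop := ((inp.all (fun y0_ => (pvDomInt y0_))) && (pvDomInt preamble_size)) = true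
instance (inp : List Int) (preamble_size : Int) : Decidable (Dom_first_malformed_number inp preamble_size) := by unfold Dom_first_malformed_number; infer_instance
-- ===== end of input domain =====

-- B replaces A's per-element complement-membership test over a mutable pop/append window by
-- sorting the re-sliced window and running a two-pointer scan; return values only (A mutates
-- only its local copy of the window, never the caller's list).

-- ===== PORT A =====
-- 'for v in preamble: if (num - v) in preamble: return True' / 'return False'
def pv_vloop (pre : List Int) (num : Int) : List Int → Bool
  | [] => false
  | v :: rest => if pre.contains (num - v) then true else pv_vloop pre num rest

def valid_number (pre : List Int) (num : Int) : Bool := pv_vloop pre num pre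

-- the main 'for i in range(preamble_size, len(inp))' loop, carrying the mutable 'preamble';
-- pyGet? = none is Python's IndexError (only reachable outside Pre_)
def pv_aloop (inp : List Int) : List Int → List Int → Option Int
  | _, [] => none
  | pre, i :: rest =>
    match PySem.List.pyGet? inp i with
    | none => none
    | some num =>
      if ¬ valid_number pre num then some num
      else pv_aloop inp (pre.tail ++ [num]) rest  -- preamble.pop(0); preamble.append(num)

def first_malformed_number (inp : List Int) (preamble_size : Int) : Option Int :=
  pv_aloop inp (PySem.List.slice inp none (some preamble_size))
    (PySem.List.pyRange preamble_size inp.length 1)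

-- ===== PORT B =====
-- the 'while l <= r' two-pointer scan; w[l]/w[r] via getD (indices are in range whenever the
-- Python loop reads them: 0 ≤ l ≤ r < len(w), so this is exact); 'fuel' is only a structural
-- totality device — r - l shrinks each step, so fuel = len(w) + 1 never runs out
def twoPtr (w : List Int) (num : Int) : Nat → Int → Int → Bool
  | 0, _, _ => false
  | fuel + 1, l, r =>
    if l ≤ r then
      let s := w.getD l.toNat 0 + w.getD r.toNat 0
      if s = num then true
      else if s < num then twoPtr w num fuel (l + 1) r
      else twoPtr w num fuel l (r - 1)
    else false

def pv_bloop (inp : List Int) (p : Int) : List Int → Option Int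
  | [] => none
  | i :: rest =>
    match PySem.List.pyGet? inp i with
    | none => none
    | some num =>
      let w := PySem.List.sorted (PySem.List.slice inp (some (i - p)) (some i)) (fun x => x) false
      if twoPtr w num (w.length + 1) 0 ((w.length : Int) - 1) then pv_bloop inp p rest
      else some num

def first_malformed_number_alt (inp : List Int) (preamble_size : Int) : Option Int :=
  pv_bloop inp preamble_size (PySem.List.pyRange preamble_size inp.length 1)

-- ===== PRECONDITION & SPEC =====
-- Pre_ restricts to the task's natural domain of nonnegative window sizes: on negative
-- preamble_size A's returned values (or IndexError) come from Python's negative-index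
-- wraparound, an artefact of the implementation no caller relies on.
def Pre_first_malformed_number (inp : List Int) (preamble_size : Int) : Prop :=
  0 ≤ preamble_size
instance (inp : List Int) (preamble_size : Int) : Decidable (Pre_first_malformed_number inp preamble_size) := by unfold Pre_first_malformed_number; infer_instance

def pvWitness_first_malformed_number : List Int × Int := ([1, 2, 3, 5, 100, 8], 3)

def Spec_first_malformed_number (inp : List Int) (preamble_size : Int) (out : Option Int) : Prop := out = first_malformed_number_alt inp preamble_size
instance (inp : List Int) (preamble_size : Int) (out : Option Int) : Decidable (Spec_first_malformed_number inp preamble_size out) := by unfold Spec_first_malformed_number; infer_instance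

-- ===== CLAIM (what is proved, stated in full; the proofs are below) =====
def Claim_equal_first_malformed_number : Prop := ∀ (inp : List Int) (preamble_size : Int), Dom_first_malformed_number inp preamble_size → Pre_first_malformed_number inp preamble_size → Spec_first_malformed_number inp preamble_size (first_malformed_number inp preamble_size)

-- ===== LEMMAS AND PROOFS =====

-- A's helper scan equals 'any v with (num - v) in pre'
lemma pv_vloop_eq_any (pre : List Int) (num : Int) :
    ∀ l, pv_vloop pre num l = l.any (fun v => pre.contains (num - v)) := by
  intro l
  induction l with
  | nil => rfl
  | cons v rest ih =>
    simp only [pv_vloop, List.any_cons, ih]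
    cases pre.contains (num - v) <;> simp

-- A's validity test holds iff some pair of window values sums to num
lemma valid_iff_pair (pre : List Int) (num : Int) :
    valid_number pre num = true ↔ ∃ x ∈ pre, ∃ y ∈ pre, x + y = num := by
  rw [valid_number, pv_vloop_eq_any, List.any_eq_true]
  constructor
  · rintro ⟨v, hv, hc⟩
    rw [List.contains_iff_mem] at hc
    exact ⟨v, hv, num - v, hc, by omega⟩
  · rintro ⟨x, hx, y, hy, hxy⟩
    refine ⟨x, hx, ?_⟩
    rw [List.contains_iff_mem]
    have : num - x = y := by omega
    rwa [this]

-- the two-pointer scan on a monotone list finds exactly the pairs inside [l, r]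
lemma twoPtr_iff (w : List Int) (num : Int)
    (hmono : ∀ p q : Nat, p ≤ q → q < w.length → w.getD p 0 ≤ w.getD q 0) :
    ∀ (n : Nat) (l r : Int), (r + 1 - l).toNat < n → 0 ≤ l → r < (w.length : Int) →
    (twoPtr w num n l r = true ↔
      ∃ i j : Nat, l ≤ (i : Int) ∧ (i : Int) ≤ r ∧ l ≤ (j : Int) ∧ (j : Int) ≤ r ∧
        w.getD i 0 + w.getD j 0 = num) := by
  intro n
  induction n with
  | zero =>
    intro l r hn hl hr
    omega
  | succ n ih =>
    intro l r hn hl hr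
    by_cases hlr : l ≤ r
    · rw [twoPtr, if_pos hlr]
      simp only
      by_cases heq : w.getD l.toNat 0 + w.getD r.toNat 0 = num
      · rw [if_pos heq]
        simp only [true_iff]
        exact ⟨l.toNat, r.toNat, by omega, by omega, by omega, by omega, heq⟩
      · rw [if_neg heq]
        by_cases hlt : w.getD l.toNat 0 + w.getD r.toNat 0 < num
        · rw [if_pos hlt, ih (l + 1) r (by omega) (by omega) hr]
          constructor
          · rintro ⟨i, j, h1, h2, h3, h4, h5⟩
            exact ⟨i, j, by omega, h2, by omega, h4, h5⟩
          · rintro ⟨i, j, h1, h2, h3, h4, h5⟩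
            refine ⟨i, j, ?_, h2, ?_, h4, h5⟩
            · -- i ≠ l: a pair with index l sums below num
              rcases eq_or_lt_of_le h1 with h | h
              · exfalso
                have hi : i = l.toNat := by omega
                rw [hi] at h5
                have : w.getD j 0 ≤ w.getD r.toNat 0 := hmono j r.toNat (by omega) (by omega)
                omega
              · omega
            · rcases eq_or_lt_of_le h3 with h | h
              · exfalso
                have hj : j = l.toNat := by omega
                rw [hj, Int.add_comm] at h5
                have : w.getD i 0 ≤ w.getD r.toNat 0 := hmono i r.toNat (by omega) (by omega)
                omega
              · omega
        · rw [if_neg hlt, ih l (r - 1) (by omega) hl (by omega)]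
          have hgt : num < w.getD l.toNat 0 + w.getD r.toNat 0 := by omega
          constructor
          · rintro ⟨i, j, h1, h2, h3, h4, h5⟩
            exact ⟨i, j, h1, by omega, h3, by omega, h5⟩
          · rintro ⟨i, j, h1, h2, h3, h4, h5⟩
            refine ⟨i, j, h1, ?_, h3, ?_, h5⟩
            · rcases eq_or_lt_of_le h2 with h | h
              · exfalso
                have hi : i = r.toNat := by omega
                rw [hi, Int.add_comm] at h5
                have : w.getD l.toNat 0 ≤ w.getD j 0 := hmono l.toNat j (by omega) (by omega)
                omega
              · omega
            · rcases eq_or_lt_of_le h4 with h | h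
              · exfalso
                have hj : j = r.toNat := by omega
                rw [hj] at h5
                have : w.getD l.toNat 0 ≤ w.getD i 0 := hmono l.toNat i (by omega) (by omega)
                omega
              · omega
    · rw [twoPtr, if_neg hlr]
      simp only [Bool.false_eq_true, false_iff]
      rintro ⟨i, j, h1, h2, _, _, _⟩
      omega

-- A's validity test over the window equals B's two-pointer scan over the sorted window
lemma valid_eq_twoPtr (pre : List Int) (num : Int) :
    valid_number pre num =
      twoPtr (PySem.List.sorted pre (fun x => x) false) num
        ((PySem.List.sorted pre (fun x => x) false).length + 1) 0
        (((PySem.List.sorted pre (fun x => x) false).length : Int) - 1) := by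
  set w := PySem.List.sorted pre (fun x => x) false with hw
  have hmono : ∀ p q : Nat, p ≤ q → q < w.length → w.getD p 0 ≤ w.getD q 0 := by
    intro p q hpq hq
    rw [List.getD_eq_getElem _ _ (lt_of_le_of_lt hpq hq), List.getD_eq_getElem _ _ hq]
    exact PySem.List.sorted_id_getElem_mono pre hpq hq
  have h2 := twoPtr_iff w num hmono (w.length + 1) 0
      ((w.length : Int) - 1) (by omega) (le_refl _) (by omega)
  have hmem : ∀ x : Int, x ∈ w ↔ x ∈ pre := by
    intro x
    rw [hw]
    exact PySem.List.mem_sorted pre (fun y => y) false x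
  rcases hb : twoPtr w num (w.length + 1) 0 ((w.length : Int) - 1) with _ | _
  · -- twoPtr false → no pair → valid_number false
    rw [hb] at h2
    simp only [Bool.false_eq_true, false_iff] at h2
    rcases hv : valid_number pre num with _ | _
    · rfl
    · exfalso
      obtain ⟨x, hx, y, hy, hxy⟩ := (valid_iff_pair pre num).mp hv
      obtain ⟨i, hi, hwi⟩ := List.mem_iff_getElem.mp ((hmem x).mpr hx)
      obtain ⟨j, hj, hwj⟩ := List.mem_iff_getElem.mp ((hmem y).mpr hy)
      exact h2 ⟨i, j, by omega, by omega, by omega, by omega, by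
        rw [List.getD_eq_getElem _ _ hi, List.getD_eq_getElem _ _ hj, hwi, hwj]; exact hxy⟩
  · rw [hb] at h2
    simp only [true_iff] at h2
    obtain ⟨i, j, h1, h2', h3, h4, h5⟩ := h2
    have hi : i < w.length := by omega
    have hj : j < w.length := by omega
    rw [List.getD_eq_getElem _ _ hi, List.getD_eq_getElem _ _ hj] at h5
    exact (valid_iff_pair pre num).mpr
      ⟨w[i], (hmem _).mp (List.getElem_mem hi), w[j], (hmem _).mp (List.getElem_mem hj), h5⟩

-- the two loops agree when A's carried window is the slice inp[i-p:i]
lemma loop_eq (inp : List Int) (pn : Nat) :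
    ∀ (k i : Nat), inp.length ≤ i + k → pn ≤ i →
    pv_aloop inp ((inp.drop (i - pn)).take pn) (PySem.List.pyRange (i : Int) inp.length 1) =
      pv_bloop inp (pn : Int) (PySem.List.pyRange (i : Int) inp.length 1) := by
  intro k
  induction k with
  | zero =>
    intro i hk _
    rw [PySem.List.pyRange_one_eq_nil (by exact_mod_cast hk)]
    rfl
  | succ k ih =>
    intro i hk hpi
    by_cases hlen : inp.length ≤ i
    · rw [PySem.List.pyRange_one_eq_nil (by exact_mod_cast hlen)]
      rfl
    · push Not at hlen
      rw [PySem.List.pyRange_one_cons (by exact_mod_cast hlen)]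
      have hget : PySem.List.pyGet? inp (i : Int) = some inp[i] := by
        rw [PySem.List.pyGet?_natCast]
        exact List.getElem?_eq_getElem hlen
      have hslice : PySem.List.slice inp (some ((i : Int) - (pn : Int))) (some (i : Int)) =
          (inp.drop (i - pn)).take pn := by
        have h1 : (i : Int) - (pn : Int) = ((i - pn : Nat) : Int) := by omega
        rw [h1, PySem.List.slice_natCast]
        congr 1
        omega
      simp only [pv_aloop, pv_bloop, hget, hslice, valid_eq_twoPtr]
      set w := (inp.drop (i - pn)).take pn with hw
      set ws := PySem.List.sorted w (fun x => x) false with hws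
      by_cases hval : twoPtr ws inp[i] (ws.length + 1) 0 ((ws.length : Int) - 1) = true
      · rw [if_neg (by simp [hval]), if_pos hval]
        -- the window is nonempty, so pn > 0 and the stepped window is a slice again
        have hwne : w ≠ [] := by
          intro hnil
          rw [hnil] at hws
          rw [hws] at hval
          simp [twoPtr] at hval
        have hpn : 0 < pn := by
          rcases Nat.eq_zero_or_pos pn with h0 | h
          · exact absurd (by simp [hw, h0]) hwne
          · exact h
        have hdroplt : i - pn < inp.length := by omega
        have hstep : w.tail ++ [inp[i]] = (inp.drop (i + 1 - pn)).take pn := by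
          have hd : inp.drop (i - pn) = inp[i - pn] :: inp.drop (i - pn + 1) := by
            rw [List.drop_eq_getElem_cons hdroplt]
          rw [hw, hd]
          obtain ⟨m, hm⟩ : ∃ m, pn = m + 1 := ⟨pn - 1, by omega⟩
          subst hm
          rw [List.take_succ_cons, List.tail_cons]
          have h2 : i + 1 - (m + 1) = i - (m + 1) + 1 := by omega
          rw [h2]
          have h3 : (inp.drop (i - (m + 1) + 1)).take (m + 1)
              = (inp.drop (i - (m + 1) + 1)).take m ++ ((inp.drop (i - (m + 1) + 1))[m]?).toList := by
            exact List.take_add_one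
          rw [h3]
          congr 1
          rw [List.getElem?_drop]
          have h4 : i - (m + 1) + 1 + m = i := by omega
          rw [h4, List.getElem?_eq_getElem hlen]
          rfl
        have h5 : ((i : Int) + 1) = ((i + 1 : Nat) : Int) := by omega
        rw [hstep, h5]
        exact ih (i + 1) (by omega) (by omega)
      · simp [hval]

-- ===== VERDICT =====
theorem first_malformed_number_spec : Claim_equal_first_malformed_number := by
  intro inp p _ hp
  have hp' : 0 ≤ p := hp
  unfold Spec_first_malformed_number first_malformed_number first_malformed_number_alt
  have hpn : p = ((p.toNat : Nat) : Int) := by omega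
  rw [hpn, PySem.List.slice_to_natCast]
  have h0 : inp.take p.toNat = (inp.drop (p.toNat - p.toNat)).take p.toNat := by simp
  rw [h0]
  exact loop_eq inp p.toNat inp.length p.toNat (by omega) (by omega)
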